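-- pv_equiv track=rewrite | github.com/chai51/av1_learning | src/frame/loop_restoration.py | _wiener_coefficient
-- ===== SOURCE A (Python) =====
-- from typing import List
--
-- def _wiener_coefficient(coeff: List[int]) -> List[int]:
--     """
--     Wiener滤波系数计算
--     规范文档 7.17.5 Wiener coefficient process
--
--     Args:
--         coeff: Wiener滤波系数
--
--     Returns:
--         filter - 7抽头滤波器系数
--     """
--     filter = [0] * 7
--     filter[3] = 128
--     for i in range(3):
--         c = coeff[i]
--         filter[i] = c
--         filter[6 - i] = c
--         filter[3] -= 2 * c
--     return filter
-- ===== SOURCE B (Python) =====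
-- from typing import List
--
-- def _wiener_coefficient(coeff: List[int]) -> List[int]:
--     """Grow the symmetric 7-tap filter inside-out from the DC tap.
--
--     Start from a one-element list holding the 128 center tap; for each coefficient, taken from the
--     innermost (index 2) outward, wrap the current filter with that coefficient on
--     both ends and subtract its doubled value from the center so the taps keep
--     summing to 128.
--     """
--     res = [128]
--     for i in (2, 1, 0):
--         c = coeff[i]
--         res = [c] + res + [c]
--         res[len(res) // 2] -= 2 * c
--     return res
-- ===== Notes on version B (the rewrite author's own statement) =====
-- stated objective: alternative
-- what changed: Instead of filling a preallocated 7-slot array by index in a forward loop, B grows the filter inside-out: starting from a one-element list holding the 128 center tap, it wraps the list with each coefficient (innermost first) on both ends and subtracts 2*c from the center each step, so symmetry and the sum-preserving center arise from the construction itself.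
import Mathlib
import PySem

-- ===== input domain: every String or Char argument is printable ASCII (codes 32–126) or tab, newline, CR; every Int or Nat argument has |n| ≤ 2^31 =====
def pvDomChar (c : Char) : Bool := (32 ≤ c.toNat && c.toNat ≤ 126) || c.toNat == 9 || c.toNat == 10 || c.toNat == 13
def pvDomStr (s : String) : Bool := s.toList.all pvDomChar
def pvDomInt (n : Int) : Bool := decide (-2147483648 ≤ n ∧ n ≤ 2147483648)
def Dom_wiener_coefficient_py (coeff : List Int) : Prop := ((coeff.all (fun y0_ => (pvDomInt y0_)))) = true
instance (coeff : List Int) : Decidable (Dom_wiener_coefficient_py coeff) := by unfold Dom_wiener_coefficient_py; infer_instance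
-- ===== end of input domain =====

-- B grows the filter inside-out from the single 128 center tap, wrapping each
-- coefficient (innermost first) on both ends and fixing up the center, instead
-- of A's forward index-assignment loop into a preallocated 7-slot array.

-- ===== PORT A =====
-- Literal port of A: filter = [0]*7; filter[3] = 128; loop i in range(3):
-- c = coeff[i]; filter[i] = c; filter[6-i] = c; filter[3] -= 2*c.
-- coeff[i] is PySem.List.pyGet?; its none (IndexError) case is outside Pre_.
def wiener_coefficient_py (coeff : List Int) : List Int :=
  (PySem.List.pyRange 0 3 1).foldl
    (fun filt i =>
      let c := (PySem.List.pyGet? coeff i).getD 0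
      let filt := filt.set i.toNat c
      let filt := filt.set (6 - i).toNat c
      filt.set 3 (filt.getD 3 0 - 2 * c))
    ([0, 0, 0, 128, 0, 0, 0] : List Int)

-- ===== PORT B =====
-- Literal port of Source B: res = [128]; for i in (2,1,0): c = coeff[i];
-- res = [c] + res + [c]; res[len(res)//2] -= 2*c.
def wiener_coefficient_py_alt (coeff : List Int) : List Int :=
  ([2, 1, 0] : List Int).foldl
    (fun res i =>
      let c := (PySem.List.pyGet? coeff i).getD 0
      let res := c :: res ++ [c]
      res.set (res.length / 2) (res.getD (res.length / 2) 0 - 2 * c))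
    ([128] : List Int)

-- ===== PRECONDITION & SPEC =====
-- A raises IndexError on coeff[i] for i < 3 when len(coeff) < 3; Pre_ excludes exactly those.
def Pre_wiener_coefficient_py (coeff : List Int) : Prop := 3 ≤ coeff.length
instance (coeff : List Int) : Decidable (Pre_wiener_coefficient_py coeff) := by unfold Pre_wiener_coefficient_py; infer_instance
def pvWitness_wiener_coefficient_py : List Int := [4, -7, 13]

def Spec_wiener_coefficient_py (coeff : List Int) (out : List Int) : Prop := out = wiener_coefficient_py_alt coeff
instance (coeff : List Int) (out : List Int) : Decidable (Spec_wiener_coefficient_py coeff out) := by unfold Spec_wiener_coefficient_py; infer_instance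

-- ===== CLAIM (what is proved, stated in full; the proofs are below) =====
def Claim_equal_wiener_coefficient_py : Prop := ∀ (coeff : List Int), Dom_wiener_coefficient_py coeff → Pre_wiener_coefficient_py coeff → Spec_wiener_coefficient_py coeff (wiener_coefficient_py coeff)

-- ===== LEMMAS AND PROOFS =====

-- ===== VERDICT (by name: the statement is the Claim_ definition above) =====
theorem wiener_coefficient_py_spec : Claim_equal_wiener_coefficient_py := by
  intro coeff _ hpre
  unfold Pre_wiener_coefficient_py at hpre
  obtain ⟨a, b, c, rest, rfl⟩ : ∃ a b c rest, coeff = a :: b :: c :: rest := by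
    match coeff, hpre with
    | a :: b :: c :: rest, _ => exact ⟨a, b, c, rest, rfl⟩
  unfold Spec_wiener_coefficient_py wiener_coefficient_py wiener_coefficient_py_alt
  have hr : PySem.List.pyRange 0 3 1 = [0, 1, 2] := by decide
  rw [hr]
  simp [PySem.List.pyGet?, PySem.List.pyIdx?, List.foldl]
  ring
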